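-- pv_equiv track=rewrite | github.com/ThinkerYzu1/bpfizer | bpfizer/regalloc.py | merge_replaced_registers
-- ===== SOURCE A (Python) =====
-- def more_often_than(insn1, insn2):
--     return False
--
-- def merge_replaced_registers(data_flow, insns_flow):
--     '''
-- data_flow: [(as_operand_INSN1, as_operand_INSN2, as_operand_INSN3, ...), ...]
-- insns_flow: [(next_INSN1, next_INSN2), ....]
-- '''
--     assert(len(data_flow) == len(insns_flow))
--     assignments = list(range(len(data_flow)))
--     for i, dout in enumerate(data_flow):
--         if len(dout) == 1 and dout[0] > i:
--             op_insn = dout[0]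
--             if assignments[op_insn] == op_insn or more_often_than(i, assignments[op_insn]):
--                 assignments[op_insn] = assignments[i]
--                 pass
--             pass
--         pass
--
--     remap = {v: i for i, v in enumerate(sorted(list(set(assignments)))) }
--     reassignments = [remap[v] for v in assignments]
--
--     return reassignments
-- ===== SOURCE B (Python) =====
-- def merge_replaced_registers(data_flow, insns_flow):
--     assert(len(data_flow) == len(insns_flow))
--     n = len(data_flow)
--     # B: no mutable assignments array, no set/sort/dict renumbering.
--     # Pass 1: parent[t] = first instruction j whose single operand is t (with t > j);
--     # only that first j can ever capture t in A's scheme.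
--     parent = [None] * n
--     for j, dout in enumerate(data_flow):
--         if len(dout) == 1 and dout[0] > j and parent[dout[0]] is None:
--             parent[dout[0]] = j
--     # Pass 2: propagate dense ids forward: a root (no parent) gets the next fresh id,
--     # a captured register inherits its parent's already-computed dense id.
--     newid = [0] * n
--     fresh = 0
--     for i in range(n):
--         if parent[i] is None:
--             newid[i] = fresh
--             fresh += 1
--         else:
--             newid[i] = newid[parent[i]]
--     return newid
-- ===== Notes on version B (the rewrite author's own statement) =====
-- stated objective: alternative
-- what changed: B drops A's mutable assignments array, its set, its sort and its remap dict entirely: it records for each register the first instruction that captures it (parent pointers), then a single forward pass assigns dense ids directly, giving roots fresh ids and letting captured registers inherit their parent's already-computed id.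
-- outside the precondition, e.g. on merge_replaced_registers([(0,)], []): A raises AssertionError, B raises AssertionError; on merge_replaced_registers([(5,)], [(0, 0)]): A raises IndexError, B raises IndexError
import Mathlib
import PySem

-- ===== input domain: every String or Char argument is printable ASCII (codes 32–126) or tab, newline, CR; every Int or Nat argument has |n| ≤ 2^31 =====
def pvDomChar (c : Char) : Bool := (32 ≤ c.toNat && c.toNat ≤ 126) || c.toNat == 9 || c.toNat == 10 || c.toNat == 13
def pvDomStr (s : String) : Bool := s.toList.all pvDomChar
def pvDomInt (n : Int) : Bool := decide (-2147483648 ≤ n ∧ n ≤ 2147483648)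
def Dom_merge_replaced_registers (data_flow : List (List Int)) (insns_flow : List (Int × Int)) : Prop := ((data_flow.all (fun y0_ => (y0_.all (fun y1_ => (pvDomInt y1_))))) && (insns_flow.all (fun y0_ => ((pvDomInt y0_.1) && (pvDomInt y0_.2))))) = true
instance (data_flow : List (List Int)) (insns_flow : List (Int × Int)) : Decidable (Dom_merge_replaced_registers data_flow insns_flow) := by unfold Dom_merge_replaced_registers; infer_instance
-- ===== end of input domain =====

-- B replaces A's mutable assignment array + set + sort + remap dict by first-capture
-- parent pointers and one forward pass that hands out dense ids directly; objective: alternative.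

-- ===== PORT A =====
def more_often_than (_insn1 _insn2 : Int) : Bool := false

-- one iteration of A's merge loop over enumerate(data_flow)
def mrrStepA (assignments : List Int) (p : Int × List Int) : List Int :=
  if (p.2.length == 1) && decide (PySem.List.pyGetD p.2 0 0 > p.1) then
    if (PySem.List.pyGetD assignments (PySem.List.pyGetD p.2 0 0) 0 == PySem.List.pyGetD p.2 0 0)
        || more_often_than p.1 (PySem.List.pyGetD assignments (PySem.List.pyGetD p.2 0 0) 0) then
      PySem.List.pySetD assignments (PySem.List.pyGetD p.2 0 0) (PySem.List.pyGetD assignments p.1 0)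
    else assignments
  else assignments

def merge_replaced_registers (data_flow : List (List Int)) (insns_flow : List (Int × Int)) : List Int :=
  let assignments := (PySem.List.enumerate data_flow 0).foldl mrrStepA (PySem.List.pyRange 0 (data_flow.length : Int))
  let remap := (PySem.List.enumerate (PySem.List.sorted (PySem.Set.ofList assignments) (fun x => x)) 0).foldl
      (fun d p => d.insert p.2 p.1) (PySem.Dict.empty : PySem.Dict Int Int)
  assignments.map (fun v => remap.getD v 0)

-- ===== PORT B =====
-- B's pass 1: record, for each register t, the first instruction j with data_flow[j] == [t] and t > j
def mrrStepP (parent : List (Option Int)) (p : Int × List Int) : List (Option Int) :=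
  if (p.2.length == 1) && decide (PySem.List.pyGetD p.2 0 0 > p.1)
      && (PySem.List.pyGetD parent (PySem.List.pyGetD p.2 0 0) none).isNone then
    PySem.List.pySetD parent (PySem.List.pyGetD p.2 0 0) (some p.1)
  else parent

-- B's pass 2: a root gets the next fresh dense id, a captured register inherits its parent's id
def mrrStepN (parent : List (Option Int)) (s : List Int × Int) (i : Int) : List Int × Int :=
  match PySem.List.pyGetD parent i none with
  | none => (PySem.List.pySetD s.1 i s.2, s.2 + 1)
  | some j => (PySem.List.pySetD s.1 i (PySem.List.pyGetD s.1 j 0), s.2)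

def merge_replaced_registers_alt (data_flow : List (List Int)) (insns_flow : List (Int × Int)) : List Int :=
  let n := data_flow.length
  let parent := (PySem.List.enumerate data_flow 0).foldl mrrStepP (List.replicate n (none : Option Int))
  ((PySem.List.pyRange 0 (n : Int)).foldl (mrrStepN parent) (List.replicate n (0 : Int), (0 : Int))).1

-- ===== PRECONDITION & SPEC =====
-- Pre_ excludes exactly the inputs on which A raises: mismatched lengths (AssertionError)
-- and a singleton dout whose value is at least the instruction count (IndexError).
def Pre_merge_replaced_registers (data_flow : List (List Int)) (insns_flow : List (Int × Int)) : Prop :=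
  data_flow.length = insns_flow.length ∧
  ∀ k < data_flow.length, (data_flow.getD k []).length = 1 →
    (k : Int) < (data_flow.getD k []).getD 0 0 → (data_flow.getD k []).getD 0 0 < (data_flow.length : Int)
instance (data_flow : List (List Int)) (insns_flow : List (Int × Int)) : Decidable (Pre_merge_replaced_registers data_flow insns_flow) := by unfold Pre_merge_replaced_registers; infer_instance

def pvWitness_merge_replaced_registers : List (List Int) × (List (Int × Int)) := ([[1], []], [(0, 0), (0, 0)])

def Spec_merge_replaced_registers (data_flow : List (List Int)) (insns_flow : List (Int × Int)) (out : List Int) : Prop := out = merge_replaced_registers_alt data_flow insns_flow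
instance (data_flow : List (List Int)) (insns_flow : List (Int × Int)) (out : List Int) : Decidable (Spec_merge_replaced_registers data_flow insns_flow out) := by unfold Spec_merge_replaced_registers; infer_instance

-- ===== CLAIM (what is proved, stated in full; the proofs are below) =====
def Claim_equal_merge_replaced_registers : Prop := ∀ (data_flow : List (List Int)) (insns_flow : List (Int × Int)), Dom_merge_replaced_registers data_flow insns_flow → Pre_merge_replaced_registers data_flow insns_flow → Spec_merge_replaced_registers data_flow insns_flow (merge_replaced_registers data_flow insns_flow)

-- ===== LEMMAS AND PROOFS =====

-- the first instruction j with data_flow[j] == [t] (valid only when j < t), as a function of the input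
def pF (df : List (List Int)) (t : Nat) : Option Nat :=
  match df.findIdx? (fun d => d == [(t : Int)]) with
  | some j => if j < t then some j else none
  | none => none

theorem pF_lt {df : List (List Int)} {t j : Nat} (h : pF df t = some j) : j < t := by
  unfold pF at h
  split at h
  · split at h
    · cases h; assumption
    · cases h
  · cases h

-- the final label every register resolves to (root of the parent chain)
def labelF (df : List (List Int)) (t : Nat) : Nat :=
  match h : pF df t with
  | some j => labelF df j
  | none => t
termination_by t
decreasing_by exact pF_lt h

-- dense id of a label = number of roots below it
def rankN (df : List (List Int)) (v : Nat) : Nat :=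
  (List.range v).countP (fun u => (pF df u).isNone)

theorem labelF_le (df : List (List Int)) : ∀ t, labelF df t ≤ t := by
  intro t
  induction t using Nat.strong_induction_on with
  | _ t ih =>
    rw [labelF]
    split
    · next j h => exact le_trans (ih j (pF_lt h)) (le_of_lt (pF_lt h))
    · exact le_rfl

theorem pF_labelF (df : List (List Int)) : ∀ t, pF df (labelF df t) = none := by
  intro t
  induction t using Nat.strong_induction_on with
  | _ t ih =>
    rw [labelF]
    split
    · next j h => exact ih j (pF_lt h)
    · next h => exact h

theorem pF_spec {df : List (List Int)} {t m : Nat} (h : pF df t = some m) :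
    m < t ∧ ∃ hm : m < df.length, df[m] = [(t : Int)] := by
  unfold pF at h
  split at h
  · next j hfind =>
    split at h
    · cases h
      rcases List.findIdx?_eq_some_iff_getElem.mp hfind with ⟨hlen, hp, _⟩
      refine ⟨by assumption, hlen, by simpa using hp⟩
    · cases h
  · cases h

theorem pF_of_entry {df : List (List Int)} {m t : Nat} (hm : m < df.length)
    (hdm : df[m] = [(t : Int)]) (hmt : m < t) : ∃ j, j ≤ m ∧ pF df t = some j := by
  rcases hfi : df.findIdx? (fun d => d == [(t : Int)]) with _ | j
  · exfalso
    have := List.findIdx?_eq_none_iff.mp hfi _ (List.getElem_mem hm)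
    simp [hdm] at this
  · rcases List.findIdx?_eq_some_iff_getElem.mp hfi with ⟨hlen, _, hmin⟩
    have hjm : j ≤ m := by
      by_contra hc
      exact hmin m (by omega) (by simp [hdm])
    have hjt : j < t := lt_of_le_of_lt hjm hmt
    exact ⟨j, hjm, by unfold pF; rw [hfi]; simp [hjt]⟩

-- A's assignment state after the first m instructions
def gA (df : List (List Int)) (m k : Nat) : Int :=
  match pF df k with
  | some j => if j < m then (labelF df k : Int) else (k : Int)
  | none => (k : Int)

-- B's parent state after the first m instructions
def gP (df : List (List Int)) (m k : Nat) : Option Int :=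
  match pF df k with
  | some j => if j < m then some (j : Int) else none
  | none => none

theorem gA_top {df : List (List Int)} {k : Nat} (hk : k < df.length) :
    gA df df.length k = (labelF df k : Int) := by
  unfold gA
  split
  · next j h =>
      have hj : j < df.length := lt_trans (pF_lt h) hk
      simp [hj]
  · next h => rw [labelF, h]

-- Pre_'s bound in getElem form
def PreB (df : List (List Int)) : Prop :=
  ∀ k (hk : k < df.length), (df[k]).length = 1 →
    (k : Int) < (df[k]).getD 0 0 → (df[k]).getD 0 0 < (df.length : Int)

theorem pyGetD_singleton (a d : Int) : PySem.List.pyGetD [a] 0 d = a := rfl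

-- pF df k = some m pins down instruction m's shape: a singleton [k] with m < k
theorem pF_target {df : List (List Int)} {k m : Nat} (h : pF df k = some m) (hm : m < df.length) :
    df[m] = [(k : Int)] ∧ m < k := by
  rcases pF_spec h with ⟨hmk, hm', hdm⟩
  exact ⟨hdm, hmk⟩

theorem gA_succ {df : List (List Int)} {m k : Nat} (h : pF df k ≠ some m) :
    gA df (m + 1) k = gA df m k := by
  unfold gA
  split
  · next j hj =>
    have hne : j ≠ m := fun he => h (he ▸ hj)
    by_cases hjm : j < m
    · rw [if_pos hjm, if_pos (by omega)]
    · rw [if_neg hjm, if_neg (by omega)]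
  · rfl

theorem gP_succ {df : List (List Int)} {m k : Nat} (h : pF df k ≠ some m) :
    gP df (m + 1) k = gP df m k := by
  unfold gP
  split
  · next j hj =>
    have hne : j ≠ m := fun he => h (he ▸ hj)
    by_cases hjm : j < m
    · rw [if_pos hjm, if_pos (by omega)]
    · rw [if_neg hjm, if_neg (by omega)]
  · rfl

theorem gA_diag (df : List (List Int)) (m : Nat) : gA df m m = (labelF df m : Int) := by
  unfold gA
  split
  · next j hj => simp [pF_lt hj]
  · next hj => rw [labelF, hj]

theorem labelF_some {df : List (List Int)} {t j : Nat} (h : pF df t = some j) :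
    labelF df t = labelF df j := by
  conv_lhs => rw [labelF]
  split
  · next j' h' =>
    have he := Option.some.inj (h'.symm.trans h)
    rw [he]
  · next h' => rw [h'] at h; cases h

theorem labelF_lt_of_pF {df : List (List Int)} {t j : Nat} (h : pF df t = some j) :
    labelF df t < t := by
  rw [labelF_some h]
  exact lt_of_le_of_lt (labelF_le df j) (pF_lt h)

-- the common shape analysis for one instruction with a singleton operand above itself
theorem singleton_case (df : List (List Int)) (hpre : PreB df) (m : Nat) (hm : m < df.length)
    (hlen1 : (df[m]).length = 1) (hgt : (m : Int) < PySem.List.pyGetD (df[m]) 0 0) :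
    ∃ t : Nat, (t : Int) = PySem.List.pyGetD (df[m]) 0 0 ∧ m < t ∧ t < df.length ∧
      df[m] = [(t : Int)] ∧ ∃ j0, j0 ≤ m ∧ pF df t = some j0 := by
  rcases List.length_eq_one_iff.mp hlen1 with ⟨a, ha⟩
  have hget : PySem.List.pyGetD (df[m]) 0 0 = a := by rw [ha]; rfl
  have hgetD : (df[m]).getD 0 0 = a := by rw [ha]; rfl
  have hbound := hpre m hm hlen1 (by rw [hgetD, ← hget]; exact hgt)
  rw [hgetD] at hbound
  rw [hget] at hgt
  have h0a : 0 ≤ a := by omega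
  refine ⟨a.toNat, by rw [hget]; omega, by omega, by omega, by rw [ha]; congr 1; omega, ?_⟩
  exact pF_of_entry (t := a.toNat) hm (by rw [ha]; congr 1; omega) (by omega)

theorem Astep (df : List (List Int)) (hpre : PreB df) (m : Nat) (hm : m < df.length) :
    mrrStepA ((List.range df.length).map (gA df m)) ((m : Int), df[m])
      = (List.range df.length).map (gA df (m + 1)) := by
  unfold mrrStepA
  dsimp only
  by_cases hc : ((df[m]).length == 1) && decide (PySem.List.pyGetD (df[m]) 0 0 > (m : Int))
  · rw [if_pos hc]
    simp only [Bool.and_eq_true, beq_iff_eq, decide_eq_true_eq] at hc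
    rcases singleton_case df hpre m hm hc.1 hc.2 with ⟨t, ht, hmt, htn, hdm, j0, hj0m, hpf⟩
    have hguardval : PySem.List.pyGetD ((List.range df.length).map (gA df m))
        (PySem.List.pyGetD (df[m]) 0 0) 0 = gA df m t := by
      rw [← ht, PySem.List.pyGetD_natCast]
      exact PySem.List.getD_map_range _ _ _ _ htn
    rcases Nat.lt_or_ge j0 m with hj0 | hj0
    · -- t was already captured earlier: assignments[t] ≠ t, no change
      have hpf' : pF df t = some j0 := hpf
      have hlab : gA df m t = (labelF df t : Int) := by
        unfold gA; rw [hpf']; simp [hj0]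
      have hne : gA df m t ≠ (t : Int) := by
        rw [hlab]
        have := labelF_lt_of_pF hpf'
        intro he; omega
      rw [if_neg]
      · apply List.map_congr_left
        intro k _
        refine (gA_succ (fun hk => ?_)).symm
        rcases pF_target hk hm with ⟨hdk, _⟩
        rw [hdm] at hdk
        have hkt : k = t := by injection hdk with h1 _; exact_mod_cast h1.symm
        rw [hkt, hpf'] at hk
        exact absurd (Option.some.inj hk) (by omega)
      · rw [hguardval, ← ht]
        simp [more_often_than, hne]
    · -- m is the first capturer of t: assignments[t] = t, capture happens
      have hj0m' : j0 = m := le_antisymm hj0m hj0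
      have hpf' : pF df t = some m := hj0m' ▸ hpf
      have hval : gA df m t = (t : Int) := by
        unfold gA; rw [hpf']; simp
      rw [if_pos]
      · rw [← ht, PySem.List.pySetD_natCast, PySem.List.pyGetD_natCast,
          List.getD_eq_getElem _ _ (by simpa using hm), List.getElem_map, List.getElem_range]
        apply List.ext_getElem (by simp)
        intro k hk1 hk2
        simp only [List.length_set, List.length_map, List.length_range] at hk1
        rw [List.getElem_set, List.getElem_map, List.getElem_range, List.getElem_map,
          List.getElem_range]
        by_cases hkt : k = t
        · subst hkt
          rw [if_pos rfl, gA_diag]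
          simp only [gA, hpf']
          rw [if_pos (Nat.lt_succ_self m), labelF_some hpf']
        · rw [if_neg (fun he => hkt he.symm)]
          refine (gA_succ (fun hk' => ?_)).symm
          rcases pF_target hk' hm with ⟨hdk, _⟩
          rw [hdm] at hdk
          have hkt' : k = t := by injection hdk with h1 _; exact_mod_cast h1.symm
          exact hkt hkt'
      · rw [hguardval, hval, ← ht]
        simp
  · rw [if_neg hc]
    apply List.map_congr_left
    intro k _
    refine (gA_succ (fun hk' => ?_)).symm
    rcases pF_target hk' hm with ⟨hdk, hmk⟩
    apply hc
    rw [hdk]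
    simp only [List.length_cons, List.length_nil, pyGetD_singleton]
    simp [hmk]

theorem Bstep (df : List (List Int)) (hpre : PreB df) (m : Nat) (hm : m < df.length) :
    mrrStepP ((List.range df.length).map (gP df m)) ((m : Int), df[m])
      = (List.range df.length).map (gP df (m + 1)) := by
  unfold mrrStepP
  dsimp only
  by_cases hc : ((df[m]).length == 1) && decide (PySem.List.pyGetD (df[m]) 0 0 > (m : Int))
  · simp only [Bool.and_eq_true, beq_iff_eq, decide_eq_true_eq] at hc
    rcases singleton_case df hpre m hm hc.1 hc.2 with ⟨t, ht, hmt, htn, hdm, j0, hj0m, hpf⟩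
    have hparval : PySem.List.pyGetD ((List.range df.length).map (gP df m))
        (PySem.List.pyGetD (df[m]) 0 0) none = gP df m t := by
      rw [← ht, PySem.List.pyGetD_natCast]
      exact PySem.List.getD_map_range _ _ _ _ htn
    rcases Nat.lt_or_ge j0 m with hj0 | hj0
    · -- t was already captured earlier: parent[t] is not None, no change
      have hval : gP df m t = some (j0 : Int) := by unfold gP; rw [hpf]; simp [hj0]
      rw [if_neg]
      · apply List.map_congr_left
        intro k _
        refine (gP_succ (fun hk' => ?_)).symm
        rcases pF_target hk' hm with ⟨hdk, _⟩
        rw [hdm] at hdk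
        have hkt : k = t := by injection hdk with h1 _; exact_mod_cast h1.symm
        rw [hkt, hpf] at hk'
        exact absurd (Option.some.inj hk') (by omega)
      · rw [hparval, hval]
        simp
    · -- m is the first capturer of t: parent[t] is None, record it
      have hj0m' : j0 = m := le_antisymm hj0m hj0
      have hpf' : pF df t = some m := hj0m' ▸ hpf
      have hval : gP df m t = none := by unfold gP; rw [hpf']; simp
      rw [if_pos]
      · rw [← ht, PySem.List.pySetD_natCast]
        apply List.ext_getElem (by simp)
        intro k hk1 hk2
        simp only [List.length_set, List.length_map, List.length_range] at hk1
        rw [List.getElem_set, List.getElem_map, List.getElem_range]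
        by_cases hkt : k = t
        · subst hkt
          rw [if_pos rfl, List.getElem_map, List.getElem_range]
          simp only [gP, hpf']
          rw [if_pos (Nat.lt_succ_self m)]
        · rw [if_neg (fun he => hkt he.symm), List.getElem_map, List.getElem_range]
          refine (gP_succ (fun hk' => ?_)).symm
          rcases pF_target hk' hm with ⟨hdk, _⟩
          rw [hdm] at hdk
          have hkt' : k = t := by injection hdk with h1 _; exact_mod_cast h1.symm
          exact hkt hkt'
      · rw [hparval, hval]
        simp [hc.1, hc.2]
  · rw [if_neg (fun h => hc (Bool.and_elim_left h))]
    apply List.map_congr_left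
    intro k _
    refine (gP_succ (fun hk' => ?_)).symm
    rcases pF_target hk' hm with ⟨hdk, hmk⟩
    apply hc
    rw [hdk]
    simp only [List.length_cons, List.length_nil, pyGetD_singleton]
    simp [hmk]

theorem loop_gen {σ : Type} (df : List (List Int)) (step : σ → Int × List Int → σ) (g : Nat → σ)
    (hstep : ∀ m (hm : m < df.length), step (g m) ((m : Int), df[m]) = g (m + 1))
    (hstable : ∀ m, df.length ≤ m → g m = g df.length) :
    ∀ (l : List (List Int)) (m : Nat), df.drop m = l →
      (PySem.List.enumerate l (m : Int)).foldl step (g m) = g df.length := by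
  intro l
  induction l with
  | nil =>
    intro m hdrop
    have hmn : df.length ≤ m := by
      have := congrArg List.length hdrop
      simp only [List.length_drop, List.length_nil] at this
      omega
    simpa using hstable m hmn
  | cons d rest ih =>
    intro m hdrop
    have hm : m < df.length := by
      by_contra hc
      rw [List.drop_eq_nil_of_le (by omega)] at hdrop
      cases hdrop
    rw [List.drop_eq_getElem_cons hm] at hdrop
    injection hdrop with h1 h2
    rw [PySem.List.enumerate_cons, List.foldl_cons, ← h1, hstep m hm]
    have hcast : (m : Int) + 1 = ((m + 1 : Nat) : Int) := by push_cast; ring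
    rw [hcast]
    exact ih (m + 1) h2

-- index of an element of a strictly increasing list = number of smaller elements
theorem idx_filter_lt (L : List Int) (hL : L.Pairwise (· < ·)) :
    ∀ j (h : j < L.length), (L.filter (fun u => decide (u < L[j]))).length = j := by
  induction L with
  | nil => intro j h; simp at h
  | cons a t ih =>
    intro j h
    rcases List.pairwise_cons.mp hL with ⟨ha, ht⟩
    cases j with
    | zero =>
      simp only [List.getElem_cons_zero]
      rw [List.filter_eq_nil_iff.mpr, List.length_nil]
      intro u hu
      rcases List.mem_cons.mp hu with rfl | hu
      · simp
      · have := ha u hu; simp; omega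
    | succ j =>
      have hj : j < t.length := by simp only [List.length_cons] at h; omega
      simp only [List.getElem_cons_succ, List.filter_cons]
      have hlt : a < t[j] := ha _ (List.getElem_mem hj)
      simp only [hlt, decide_true, if_pos, List.length_cons]
      exact congrArg Nat.succ (ih ht j hj)

-- range filtered below a cut is a range
theorem filter_lt_pyRange (n v : Int) (h0 : 0 ≤ v) (hv : v ≤ n) :
    (PySem.List.pyRange 0 n).filter (fun u => decide (u < v)) = PySem.List.pyRange 0 v := by
  rw [PySem.List.pyRange_one_append 0 v n h0 hv, List.filter_append]
  rw [List.filter_eq_self.mpr, List.filter_eq_nil_iff.mpr, List.append_nil]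
  · intro u hu; rcases PySem.List.mem_pyRange_one.mp hu with ⟨h1, h2⟩; simp; omega
  · intro u hu; rcases PySem.List.mem_pyRange_one.mp hu with ⟨h1, h2⟩; simp; omega

-- A's renumbering of the label list computes rankN of each label
theorem Arenumber (df : List (List Int)) :
    ((List.range df.length).map (fun k => (labelF df k : Int))).map (fun v =>
      ((PySem.List.enumerate (PySem.List.sorted
          (PySem.Set.ofList ((List.range df.length).map (fun k => (labelF df k : Int)))) (fun x => x)) 0).foldl
        (fun d p => d.insert p.2 p.1) (PySem.Dict.empty : PySem.Dict Int Int)).getD v 0)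
      = (List.range df.length).map (fun k => ((rankN df (labelF df k) : Nat) : Int)) := by
  set n : Nat := df.length with hn
  set as : List Int := (List.range df.length).map (fun k => (labelF df k : Int)) with has
  have hbounds : ∀ v ∈ as, 0 ≤ v ∧ v < (n : Int) := by
    intro v hv
    rcases List.mem_map.mp hv with ⟨k, hk, rfl⟩
    rw [List.mem_range] at hk
    have hle := labelF_le df k
    exact ⟨by positivity, by exact_mod_cast lt_of_le_of_lt hle hk⟩
  set q : Int → Bool := PySem.Set.contains (PySem.Set.ofList as) with hq
  have hqdef : ∀ u, q u = decide (u ∈ as) := by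
    intro u; simp [hq, pysem]
  have hmem_as : ∀ u : Nat, u < n → ((u : Int) ∈ as ↔ pF df u = none) := by
    intro u hu
    constructor
    · intro hmem
      rcases List.mem_map.mp hmem with ⟨k, _, hk⟩
      have : u = labelF df k := by exact_mod_cast hk.symm
      rw [this]
      exact pF_labelF df k
    · intro hnone
      refine List.mem_map.mpr ⟨u, List.mem_range.mpr hu, ?_⟩
      rw [labelF, hnone]
  set F : List Int := (PySem.List.pyRange 0 (n : Int)).filter q with hF
  have hFpair : F.Pairwise (· < ·) := (PySem.List.pairwise_lt_pyRange_one 0 (n : Int)).filter q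
  have hFmem : ∀ u, u ∈ F ↔ u ∈ as := by
    intro u
    rw [hF, List.mem_filter, PySem.List.mem_pyRange_one, hqdef]
    constructor
    · rintro ⟨_, h⟩; simpa using h
    · intro h
      rcases hbounds u h with ⟨h1, h2⟩
      exact ⟨⟨h1, h2⟩, by simpa using h⟩
  have hsorted : PySem.List.sorted (PySem.Set.ofList as) (fun x => x) = F := by
    apply PySem.List.sorted_eq_of_perm_of_pairwise_lt
    · rw [List.perm_ext_iff_of_nodup ((PySem.List.nodup_pyRange_one 0 (n : Int)).filter q)
        (PySem.Set.nodup_ofList as)]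
      intro u
      rw [← hF, hFmem u, PySem.Set.mem_ofList]
    · exact hFpair
  rw [hsorted]
  set remap : PySem.Dict Int Int :=
    (PySem.List.enumerate F 0).foldl (fun d p => d.insert p.2 p.1) PySem.Dict.empty with hremap
  have hitems : remap.items = (PySem.List.enumerate F 0).map (fun p => (p.2, p.1)) := by
    rw [hremap]
    rw [PySem.Dict.items_foldl_insert_fresh (PySem.List.enumerate F 0)
      (fun p => p.2) (fun p => p.1) PySem.Dict.empty (by intro a _; simp [pysem])
      (by rw [PySem.List.map_snd_enumerate]
          exact ((PySem.List.nodup_pyRange_one 0 (n : Int)).filter q))]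
    have he : (PySem.Dict.empty : PySem.Dict Int Int).items = [] := rfl
    simp [pysem, he]
  have hkeys : remap.keys = F := by
    show remap.items.map (·.1) = F
    rw [hitems, List.map_map]
    exact PySem.List.map_snd_enumerate F 0
  conv_lhs => rw [has]
  rw [List.map_map]
  apply List.map_congr_left
  intro k hk
  rw [List.mem_range] at hk
  simp only [Function.comp_apply]
  set w : Nat := labelF df k with hw
  have hwn : w < n := lt_of_le_of_lt (labelF_le df k) hk
  have hv : (w : Int) ∈ as := by
    rw [hmem_as w hwn, hw]
    exact pF_labelF df k
  rcases List.mem_iff_getElem.mp ((hFmem _).mpr hv) with ⟨j, hjF, hFj⟩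
  have hAval : remap.getD (w : Int) 0 = (j : Int) := by
    have hjlen : j < (PySem.List.enumerate F 0).length := by
      rw [PySem.List.length_enumerate]; exact hjF
    have hmemit : ((w : Int), (0 + (j : Int))) ∈ remap.items := by
      rw [hitems]
      have hm1 := List.getElem_mem hjlen
      rw [PySem.List.getElem_enumerate F 0 j hjlen] at hm1
      have := List.mem_map_of_mem (f := fun p : Int × Int => (p.2, p.1)) hm1
      simpa [hFj] using this
    have := PySem.Dict.getD_of_mem_items remap hmemit
      (by rw [hkeys]; exact (PySem.List.nodup_pyRange_one 0 (n : Int)).filter q) 0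
    simpa using this
  rw [hAval]
  have hcnt : j = (PySem.List.pyRange 0 (w : Int)).countP q := by
    have hidx := idx_filter_lt F hFpair j hjF
    rw [hFj] at hidx
    rw [← hidx, List.countP_eq_length_filter, hF, List.filter_filter]
    rw [show List.filter (fun a => decide (a < (w : Int)) && q a) (PySem.List.pyRange 0 (n : Int))
          = List.filter (fun a => q a && decide (a < (w : Int))) (PySem.List.pyRange 0 (n : Int))
        from List.filter_congr (fun u _ => Bool.and_comm _ _)]
    rw [← List.filter_filter, filter_lt_pyRange (n : Int) (w : Int) (by positivity) (by exact_mod_cast le_of_lt hwn)]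
  rw [hcnt]
  rw [PySem.List.pyRange_zero_natCast, List.countP_map]
  have hfinal : (List.range w).countP (q ∘ fun (k : Nat) => ((k : Int)))
      = rankN df w := by
    unfold rankN
    apply List.countP_congr
    intro u hu
    rw [List.mem_range] at hu
    simp only [Function.comp_apply]
    rw [hqdef]
    by_cases hpu : pF df u = none
    · simp [(hmem_as u (by omega)).mpr hpu, hpu]
    · rcases Option.ne_none_iff_exists'.mp hpu with ⟨j', hj'⟩
      have hnm : ¬ ((u : Int) ∈ as) := fun hmem => hpu ((hmem_as u (by omega)).mp hmem)
      simp [hnm, hj']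
  exact congrArg (fun z : Nat => (z : Int)) hfinal

-- B's second pass fills in rankN of each label
theorem Bpass2 (df : List (List Int)) :
    ∀ i ≤ df.length,
      (PySem.List.pyRange 0 (i : Int)).foldl (mrrStepN ((List.range df.length).map (gP df df.length)))
        (List.replicate df.length (0 : Int), (0 : Int))
      = ((List.range df.length).map (fun k => if k < i then ((rankN df (labelF df k) : Nat) : Int) else 0),
         (((List.range i).countP (fun u => (pF df u).isNone) : Nat) : Int)) := by
  intro i
  induction i with
  | zero =>
    intro _
    show (List.replicate df.length (0 : Int), (0 : Int)) = _
    refine Prod.ext ?_ (by simp)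
    show List.replicate df.length (0 : Int) = List.map _ (List.range df.length)
    apply List.ext_getElem (by simp)
    intro k hk1 hk2
    simp
  | succ i ih =>
    intro hi
    have hin : i < df.length := hi
    have hcast : ((i + 1 : Nat) : Int) = (i : Int) + 1 := by push_cast; ring
    rw [hcast, PySem.List.pyRange_one_succ_right (by omega), List.foldl_append,
      List.foldl_cons, List.foldl_nil, ih (by omega)]
    have hpar : PySem.List.pyGetD ((List.range df.length).map (gP df df.length)) (i : Int) none
        = gP df df.length i := by
      rw [PySem.List.pyGetD_natCast]
      exact PySem.List.getD_map_range _ _ _ _ hin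
    unfold mrrStepN
    rw [hpar]
    dsimp only
    rcases hpf : pF df i with _ | j
    · -- register i is a root: it gets the next fresh id
      have hgp : gP df df.length i = none := by unfold gP; rw [hpf]
      rw [hgp]
      have hlab : labelF df i = i := by rw [labelF, hpf]
      refine Prod.ext ?_ ?_
      · show PySem.List.pySetD _ (i : Int) _ = List.map _ (List.range df.length)
        rw [PySem.List.pySetD_natCast]
        apply List.ext_getElem (by simp)
        intro k hk1 hk2
        simp only [List.length_set, List.length_map, List.length_range] at hk1
        rw [List.getElem_set, List.getElem_map, List.getElem_range]
        by_cases hki : i = k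
        · subst hki
          rw [if_pos rfl, List.getElem_map, List.getElem_range,
            if_pos (Nat.lt_succ_self i), hlab]
          rfl
        · rw [List.getElem_map, List.getElem_range, if_neg hki]
          by_cases hki' : k < i
          · rw [if_pos hki', if_pos (by omega)]
          · rw [if_neg hki', if_neg (by omega)]
      · show ((List.range i).countP _ : Int) + 1 = ((List.range (i+1)).countP _ : Int)
        rw [List.range_succ, List.countP_append]
        simp [hpf]
    · -- register i was captured: it inherits its parent's id
      have hji : j < i := pF_lt hpf
      have hgp : gP df df.length i = some (j : Int) := by
        have hjn : j < df.length := by omega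
        unfold gP; rw [hpf]; simp [hjn]
      rw [hgp]
      have hlab : labelF df i = labelF df j := labelF_some hpf
      have hget : PySem.List.pyGetD ((List.range df.length).map
          (fun k => if k < i then ((rankN df (labelF df k) : Nat) : Int) else 0)) (j : Int) 0
          = ((rankN df (labelF df j) : Nat) : Int) := by
        rw [PySem.List.pyGetD_natCast,
          PySem.List.getD_map_range _ _ _ _ (by omega : j < df.length)]
        rw [if_pos hji]
      refine Prod.ext ?_ ?_
      · show PySem.List.pySetD _ (i : Int) _ = List.map _ (List.range df.length)
        rw [PySem.List.pySetD_natCast, hget]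
        apply List.ext_getElem (by simp)
        intro k hk1 hk2
        simp only [List.length_set, List.length_map, List.length_range] at hk1
        rw [List.getElem_set, List.getElem_map, List.getElem_range]
        by_cases hki : i = k
        · subst hki
          rw [if_pos rfl, List.getElem_map, List.getElem_range,
            if_pos (Nat.lt_succ_self i), hlab]
        · rw [List.getElem_map, List.getElem_range, if_neg hki]
          by_cases hki' : k < i
          · rw [if_pos hki', if_pos (by omega)]
          · rw [if_neg hki', if_neg (by omega)]
      · show ((List.range i).countP _ : Int) = ((List.range (i+1)).countP _ : Int)
        rw [List.range_succ, List.countP_append]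
        simp [hpf]

-- ===== VERDICT (by name: the statement is the Claim_ definition above) =====
theorem merge_replaced_registers_spec : Claim_equal_merge_replaced_registers := by
  intro data_flow insns_flow _hdom hpre
  unfold Spec_merge_replaced_registers
  obtain ⟨_hlen, hb⟩ := hpre
  have hpreB : PreB data_flow := by
    intro k hk h1 h2
    have hbk := hb k hk
    rw [List.getD_eq_getElem data_flow [] hk] at hbk
    exact hbk h1 h2
  have hstableA : ∀ m, data_flow.length ≤ m →
      (List.range data_flow.length).map (gA data_flow m)
        = (List.range data_flow.length).map (gA data_flow data_flow.length) := by
    intro m hm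
    apply List.map_congr_left
    intro k hk
    rw [List.mem_range] at hk
    unfold gA
    split
    · next j hj =>
      have := pF_lt hj
      rw [if_pos (by omega), if_pos (by omega)]
    · rfl
  have hinitA : PySem.List.pyRange 0 (data_flow.length : Int)
      = (List.range data_flow.length).map (gA data_flow 0) := by
    rw [PySem.List.pyRange_zero_natCast]
    apply List.map_congr_left
    intro k _
    unfold gA
    split
    · next j hj => rw [if_neg (by omega)]
    · rfl
  have hasA : (PySem.List.enumerate data_flow 0).foldl mrrStepA
      (PySem.List.pyRange 0 (data_flow.length : Int))
      = (List.range data_flow.length).map (fun k => (labelF data_flow k : Int)) := by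
    rw [hinitA]
    have hl := loop_gen data_flow mrrStepA (fun m => (List.range data_flow.length).map (gA data_flow m))
      (Astep data_flow hpreB) hstableA data_flow 0 rfl
    simp only [Nat.cast_zero] at hl
    rw [hl]
    apply List.map_congr_left
    intro k hk
    rw [List.mem_range] at hk
    exact gA_top hk
  have hstableP : ∀ m, data_flow.length ≤ m →
      (List.range data_flow.length).map (gP data_flow m)
        = (List.range data_flow.length).map (gP data_flow data_flow.length) := by
    intro m hm
    apply List.map_congr_left
    intro k hk
    rw [List.mem_range] at hk
    unfold gP
    split
    · next j hj =>
      have := pF_lt hj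
      rw [if_pos (by omega), if_pos (by omega)]
    · rfl
  have hinitP : List.replicate data_flow.length (none : Option Int)
      = (List.range data_flow.length).map (gP data_flow 0) := by
    apply List.ext_getElem (by simp)
    intro k hk1 hk2
    rw [List.getElem_replicate, List.getElem_map, List.getElem_range]
    unfold gP
    split
    · next j hj => rw [if_neg (by omega)]
    · rfl
  have hasP : (PySem.List.enumerate data_flow 0).foldl mrrStepP
      (List.replicate data_flow.length (none : Option Int))
      = (List.range data_flow.length).map (gP data_flow data_flow.length) := by
    rw [hinitP]
    have hl := loop_gen data_flow mrrStepP (fun m => (List.range data_flow.length).map (gP data_flow m))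
      (Bstep data_flow hpreB) hstableP data_flow 0 rfl
    simp only [Nat.cast_zero] at hl
    exact hl
  have hA : merge_replaced_registers data_flow insns_flow
      = (List.range data_flow.length).map (fun k => ((rankN data_flow (labelF data_flow k) : Nat) : Int)) := by
    unfold merge_replaced_registers
    rw [hasA, Arenumber data_flow]
  have hB : merge_replaced_registers_alt data_flow insns_flow
      = (List.range data_flow.length).map (fun k => ((rankN data_flow (labelF data_flow k) : Nat) : Int)) := by
    unfold merge_replaced_registers_alt
    show ((PySem.List.pyRange 0 (data_flow.length : Int)).foldl
        (mrrStepN ((PySem.List.enumerate data_flow 0).foldl mrrStepP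
          (List.replicate data_flow.length (none : Option Int))))
        (List.replicate data_flow.length (0 : Int), (0 : Int))).1 = _
    rw [hasP, Bpass2 data_flow data_flow.length le_rfl]
    apply List.map_congr_left
    intro k hk
    rw [List.mem_range] at hk
    rw [if_pos hk]
  rw [hA, hB]
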